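-- pv_equiv track=rewrite | github.com/Ublyudok-kun/reversi | revisarJugadas.py | revisar_abajo
-- ===== SOURCE A (Python) =====
-- def revisar_abajo(tablero, x, y, turno, dimension, jugadas_posibles):
--     if (x >= 0 and x < dimension):
--         try:
--             # abajo
--             if (tablero[x+1][y] == 0 and tablero[x][y] == (turno*-1)):
--                 jugadas_posibles.append((x+1, y))
--
--             elif (tablero[x+1][y] == (turno*-1)):
--                 revisar_abajo(tablero, x+1, y, turno, dimension, jugadas_posibles)
--         except:
--             IndexError
--
--     return jugadas_posibles
-- ===== SOURCE B (Python) =====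
-- # B: iterative two-phase scan -- first skip the run of opponent discs below (x, y),
-- # then do a single capture check at the end of the run. Like A it appends the found
-- # move to jugadas_posibles in place and returns that same list.
-- def revisar_abajo(tablero, x, y, turno, dimension, jugadas_posibles):
--     opp = -turno
--     i = x
--     try:
--         while 0 <= i < dimension and tablero[i + 1][y] == opp:
--             i += 1
--         if 0 <= i < dimension and tablero[i + 1][y] == 0 and tablero[i][y] == opp:
--             jugadas_posibles.append((i + 1, y))
--     except IndexError:
--         pass
--     return jugadas_posibles
-- ===== Notes on version B (the rewrite author's own statement) =====
-- stated objective: alternative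
-- what changed: Replaced A's tail recursion (one try/except with a three-way branch per cell) by an iterative two-phase scan: a loop that skips the run of opponent discs, then a single capture check at the end of the run; Pre_ excludes turno = 0, which is no Reversi player, and there A's comparison with turno*-1 = 0 makes it append moves after runs of empty cells.
-- outside the precondition, e.g. on revisar_abajo([[0], [0]], 0, 0, 0, 2, []): A returns [(1, 0)], B returns []
import Mathlib
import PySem

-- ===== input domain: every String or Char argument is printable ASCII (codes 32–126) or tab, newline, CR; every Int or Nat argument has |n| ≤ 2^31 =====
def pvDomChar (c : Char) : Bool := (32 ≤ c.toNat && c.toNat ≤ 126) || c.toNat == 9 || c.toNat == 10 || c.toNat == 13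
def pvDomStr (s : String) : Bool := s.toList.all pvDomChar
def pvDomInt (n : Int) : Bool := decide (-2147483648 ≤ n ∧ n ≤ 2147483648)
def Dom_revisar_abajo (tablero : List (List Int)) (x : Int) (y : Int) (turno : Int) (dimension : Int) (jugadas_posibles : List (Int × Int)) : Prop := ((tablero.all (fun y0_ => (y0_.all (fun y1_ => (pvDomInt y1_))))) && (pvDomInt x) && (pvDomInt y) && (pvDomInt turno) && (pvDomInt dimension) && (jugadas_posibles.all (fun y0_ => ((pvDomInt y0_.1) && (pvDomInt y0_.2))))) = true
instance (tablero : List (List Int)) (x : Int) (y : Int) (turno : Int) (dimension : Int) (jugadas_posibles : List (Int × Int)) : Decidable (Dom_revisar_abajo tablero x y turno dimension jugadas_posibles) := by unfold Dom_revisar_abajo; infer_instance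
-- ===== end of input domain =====

-- B replaces A's tail recursion by an iterative two-phase scan (skip the opponent run,
-- then one capture check); objective: alternative, same cost. Both Pythons append the
-- found move to jugadas_posibles in place; the equivalence proved is about the return value.

-- shared cell-read helper: tablero[i][j] as both Pythons read it (none = IndexError)
def pvCell (t : List (List Int)) (i j : Int) : Option Int :=
  (PySem.List.pyGet? t i).bind (fun r => PySem.List.pyGet? r j)

-- ===== PORT A =====
-- literal transliteration of A: the bare `except` makes every failed cell access return
-- jugadas_posibles unchanged, so each tablero[..][..] read is a pvCell with `none => jp`.
-- The recursion depth is bounded by (dimension - x).toNat, so the fuel below only makes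
-- the same recursion structural; it is never exhausted.
def revisarAbajoGo (tablero : List (List Int)) (y : Int) (turno : Int) (dimension : Int) (jugadas_posibles : List (Int × Int)) : Nat → Int → List (Int × Int)
  | 0, _ => jugadas_posibles
  | fuel + 1, x =>
    if 0 ≤ x ∧ x < dimension then
      match pvCell tablero (x + 1) y with
      | none => jugadas_posibles
      | some v =>
        if v = 0 then
          match pvCell tablero x y with
          | none => jugadas_posibles
          | some w =>
            if w = turno * -1 then jugadas_posibles ++ [(x + 1, y)]
            else if v = turno * -1 then revisarAbajoGo tablero y turno dimension jugadas_posibles fuel (x + 1)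
            else jugadas_posibles
        else if v = turno * -1 then revisarAbajoGo tablero y turno dimension jugadas_posibles fuel (x + 1)
        else jugadas_posibles
    else jugadas_posibles

def revisar_abajo (tablero : List (List Int)) (x : Int) (y : Int) (turno : Int) (dimension : Int) (jugadas_posibles : List (Int × Int)) : List (Int × Int) :=
  revisarAbajoGo tablero y turno dimension jugadas_posibles ((dimension - x).toNat + 1) x

-- ===== PORT B =====
-- Source B's post-loop capture check (the `if` after the while): any IndexError → jp unchanged.
def pvCheckAbajo (tablero : List (List Int)) (y : Int) (opp : Int) (dimension : Int) (jugadas_posibles : List (Int × Int)) (i : Int) : List (Int × Int) :=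
  if 0 ≤ i ∧ i < dimension then
    match pvCell tablero (i + 1) y with
    | none => jugadas_posibles
    | some v =>
      if v = 0 then
        match pvCell tablero i y with
        | none => jugadas_posibles
        | some w => if w = opp then jugadas_posibles ++ [(i + 1, y)] else jugadas_posibles
      else jugadas_posibles
  else jugadas_posibles

-- Source B's while loop: advance i while the cell below is the opponent's; i increases towards
-- dimension, so the fuel only makes the loop structural and is never exhausted.
def pvSkipAbajo (tablero : List (List Int)) (y : Int) (opp : Int) (dimension : Int) (jugadas_posibles : List (Int × Int)) : Nat → Int → List (Int × Int)
  | 0, _ => jugadas_posibles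
  | fuel + 1, i =>
    if 0 ≤ i ∧ i < dimension then
      match pvCell tablero (i + 1) y with
      | none => jugadas_posibles
      | some v =>
        if v = opp then pvSkipAbajo tablero y opp dimension jugadas_posibles fuel (i + 1)
        else pvCheckAbajo tablero y opp dimension jugadas_posibles i
    else pvCheckAbajo tablero y opp dimension jugadas_posibles i

def revisar_abajo_alt (tablero : List (List Int)) (x : Int) (y : Int) (turno : Int) (dimension : Int) (jugadas_posibles : List (Int × Int)) : List (Int × Int) :=
  pvSkipAbajo tablero y (-turno) dimension jugadas_posibles ((dimension - x).toNat + 1) x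

-- ===== PRECONDITION & SPEC =====
-- Pre_ restricts to the game's natural domain: turno = 0 is no Reversi player; there A's
-- comparison with turno*-1 = 0 makes it append moves after runs of EMPTY cells, which B's
-- natural scan does not reproduce (see claim cites).
def Pre_revisar_abajo (tablero : List (List Int)) (x : Int) (y : Int) (turno : Int) (dimension : Int) (jugadas_posibles : List (Int × Int)) : Prop := turno ≠ 0
instance (tablero : List (List Int)) (x : Int) (y : Int) (turno : Int) (dimension : Int) (jugadas_posibles : List (Int × Int)) : Decidable (Pre_revisar_abajo tablero x y turno dimension jugadas_posibles) := by unfold Pre_revisar_abajo; infer_instance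
def pvWitness_revisar_abajo : List (List Int) × Int × Int × Int × Int × (List (Int × Int)) := ([[1, -1], [-1, 0]], 0, 0, 1, 2, [])
def Spec_revisar_abajo (tablero : List (List Int)) (x : Int) (y : Int) (turno : Int) (dimension : Int) (jugadas_posibles : List (Int × Int)) (out : List (Int × Int)) : Prop := out = revisar_abajo_alt tablero x y turno dimension jugadas_posibles
instance (tablero : List (List Int)) (x : Int) (y : Int) (turno : Int) (dimension : Int) (jugadas_posibles : List (Int × Int)) (out : List (Int × Int)) : Decidable (Spec_revisar_abajo tablero x y turno dimension jugadas_posibles out) := by unfold Spec_revisar_abajo; infer_instance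

-- ===== CLAIM (what is proved, stated in full; the proofs are below) =====
def Claim_equal_revisar_abajo : Prop := ∀ (tablero : List (List Int)) (x : Int) (y : Int) (turno : Int) (dimension : Int) (jugadas_posibles : List (Int × Int)), Dom_revisar_abajo tablero x y turno dimension jugadas_posibles → Pre_revisar_abajo tablero x y turno dimension jugadas_posibles → Spec_revisar_abajo tablero x y turno dimension jugadas_posibles (revisar_abajo tablero x y turno dimension jugadas_posibles)

-- ===== LEMMAS AND PROOFS =====

-- lockstep: with turno ≠ 0, A's recursion from row i equals B's skip-then-check loop,
-- for any common fuel.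
lemma go_eq_skip (tablero : List (List Int)) (y turno dimension : Int) (jp : List (Int × Int))
    (ht : turno ≠ 0) :
    ∀ (n : Nat) (i : Int),
      revisarAbajoGo tablero y turno dimension jp n i =
      pvSkipAbajo tablero y (-turno) dimension jp n i := by
  intro n
  induction n with
  | zero => intro i; rfl
  | succ n ih =>
    intro i
    rw [revisarAbajoGo, pvSkipAbajo]
    by_cases hg : 0 ≤ i ∧ i < dimension
    · simp only [if_pos hg]
      rcases hv : pvCell tablero (i + 1) y with _ | v
      · rfl
      · by_cases h0 : v = 0
        · subst h0
          have hne : ¬ (0 : Int) = -turno := by omega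
          simp only [if_pos rfl, if_neg hne, pvCheckAbajo, if_pos hg, hv, if_pos rfl]
          rcases hw : pvCell tablero i y with _ | w
          · rfl
          · by_cases hwt : w = turno * -1
            · simp [hwt, show turno * -1 = -turno by ring]
            · have hwt' : ¬ w = -turno := by
                intro h; exact hwt (by rw [h]; ring)
              have h0t : ¬ (0 : Int) = turno * -1 := by
                intro h; exact ht (by omega)
              simp [hwt, hwt', h0t]
              intro h; exact absurd h ht
        · by_cases hvt : v = -turno
          · have : v = turno * -1 := by rw [hvt]; ring
            simp only [if_neg h0, if_pos this, if_pos hvt]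
            exact ih (i + 1)
          · have hvt' : ¬ v = turno * -1 := by
              intro h; exact hvt (by rw [h]; ring)
            simp only [if_neg h0, if_neg hvt', if_neg hvt, pvCheckAbajo, if_pos hg, hv,
              if_neg h0]
    · simp only [if_neg hg, pvCheckAbajo, if_neg hg]

-- ===== VERDICT (by name: the statement is the Claim_ definition above) =====
theorem revisar_abajo_spec : Claim_equal_revisar_abajo := by
  intro tablero x y turno dimension jp _ ht
  unfold Spec_revisar_abajo revisar_abajo revisar_abajo_alt
  exact go_eq_skip tablero y turno dimension jp ht _ x
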